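-- pv_equiv track=rewrite | github.com/nastyh/LeetCode | Basic Data Structures/1180_Count_Substrings_with_Only_One_Distinct_Letter.py | countLetters_dp
-- ===== SOURCE A (Python) =====
-- def countLetters_dp(S):  # O(n) and O(n)
--     """
--     if the previous letter is the same, increment the counter
--     If it's different, put counter to one
--     """
--     total = 1
--     substrings = [0] * len(S)
--     substrings[0] = 1
--     for i in range(1, len(S)):
--         if S[i - 1] == S[i]:
--             substrings[i] = substrings[i-1] + 1
--         else:
--             substrings[i] = 1
--         total += substrings[i]
--     return total
-- ===== SOURCE B (Python) =====
-- def countLetters_dp(S):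
--     # per-run closed form: each maximal run of length r contributes r*(r+1)//2
--     prev = S[0]
--     run = 1
--     total = 0
--     for ch in S[1:]:
--         if ch == prev:
--             run += 1
--         else:
--             total += run * (run + 1) // 2
--             prev = ch
--             run = 1
--     return total + run * (run + 1) // 2
-- ===== Notes on version B (the rewrite author's own statement) =====
-- stated objective: simpler
-- what changed: Replaces A's per-index DP array of substring counts with a single pass over maximal runs of equal letters, adding each run's triangular number run*(run+1)//2 in closed form.
import Mathlib
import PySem

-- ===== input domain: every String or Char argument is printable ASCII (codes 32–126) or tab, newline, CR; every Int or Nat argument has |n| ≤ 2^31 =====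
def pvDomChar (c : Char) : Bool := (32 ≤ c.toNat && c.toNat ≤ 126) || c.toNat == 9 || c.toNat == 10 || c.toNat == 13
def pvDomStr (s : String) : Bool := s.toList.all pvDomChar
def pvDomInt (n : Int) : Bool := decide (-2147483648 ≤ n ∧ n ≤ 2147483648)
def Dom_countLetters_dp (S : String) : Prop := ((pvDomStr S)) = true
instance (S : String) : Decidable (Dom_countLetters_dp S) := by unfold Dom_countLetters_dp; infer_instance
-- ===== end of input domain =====

-- B replaces A's per-index DP array with a one-pass per-run closed-form (triangular-number) count; return values agree on all non-empty strings.


-- ===== PORT A =====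
-- literal port of A: a DP array 'substrings', total starts at 1, loop over range(1, len(S));
-- S[i] / substrings[i-1] are in-range nonnegative indices, ported with pyGetD; the in-range
-- assignment substrings[i] = v is List.set i.toNat v.
def countLetters_dp (S : String) : Int :=
  let l := S.toList
  let subs0 : List Int := (List.replicate l.length 0).set 0 1
  let st := (PySem.List.pyRange 1 (l.length : Int) 1).foldl
    (fun (st : List Int × Int) i =>
      let v : Int := if PySem.List.pyGetD l (i - 1) ' ' == PySem.List.pyGetD l i ' '
                     then PySem.List.pyGetD st.1 (i - 1) 0 + 1 else 1
      (st.1.set i.toNat v, st.2 + v))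
    (subs0, (1 : Int))
  st.2

-- ===== PORT B =====
def triB (run : Int) : Int := PySem.Int.floordiv (run * (run + 1)) 2

def bLoop : List Char → Char → Int → Int → Int
  | [], _, run, total => total + triB run
  | c :: rest, prev, run, total =>
    if c == prev then bLoop rest prev (run + 1) total
    else bLoop rest c 1 (total + triB run)

def countLetters_dp_alt (S : String) : Int :=
  match S.toList with
  | [] => 0  -- unreachable under Pre_: Python B raises IndexError on "" (as A does)
  | c :: rest => bLoop rest c 1 0

-- ===== PRECONDITION & SPEC =====
-- Pre_ excludes only the empty string, on which A raises IndexError (substrings[0] = 1).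
def Pre_countLetters_dp (S : String) : Prop := S.toList ≠ []
instance (S : String) : Decidable (Pre_countLetters_dp S) := by unfold Pre_countLetters_dp; infer_instance
def pvWitness_countLetters_dp : String := "aab"

def Spec_countLetters_dp (S : String) (out : Int) : Prop := out = countLetters_dp_alt S
instance (S : String) (out : Int) : Decidable (Spec_countLetters_dp S out) := by unfold Spec_countLetters_dp; infer_instance

-- ===== CLAIM (what is proved, stated in full; the proofs are below) =====
def Claim_equal_countLetters_dp : Prop := ∀ (S : String), Dom_countLetters_dp S → Pre_countLetters_dp S → Spec_countLetters_dp S (countLetters_dp S)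

-- ===== LEMMAS AND PROOFS =====

-- A's loop as a structural recursion carrying (prev char, previous DP value, total)
def aRec : List Char → Char → Int → Int → Int
  | [], _, _, total => total
  | c :: rest, prev, cur, total =>
    let v : Int := if prev == c then cur + 1 else 1
    aRec rest c v (total + v)

lemma triB_succ (run : Int) : triB (run + 1) = triB run + (run + 1) := by
  unfold triB
  rw [PySem.Int.floordiv_eq_ediv_of_pos (by norm_num),
      PySem.Int.floordiv_eq_ediv_of_pos (by norm_num)]
  have h : (run + 1) * (run + 1 + 1) = run * (run + 1) + (run + 1) * 2 := by ring
  rw [h, Int.add_mul_ediv_right _ _ (by norm_num)]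

lemma aRec_eq_bLoop (rest : List Char) : ∀ (prev : Char) (run total : Int),
    aRec rest prev run (total + triB run) = bLoop rest prev run total := by
  induction rest with
  | nil => intro prev run total; simp [aRec, bLoop]
  | cons c rest ih =>
    intro prev run total
    by_cases h : prev = c
    · subst h
      simp only [aRec, bLoop, beq_self_eq_true, if_true]
      have : total + triB run + (run + 1) = total + triB (run + 1) := by
        rw [triB_succ]; ring
      rw [this, ih]
    · have hc1 : (prev == c) = false := by simp [h]
      have hc2 : (c == prev) = false := by simp [Ne.symm h]
      simp only [aRec, bLoop, hc1, hc2, if_false, Bool.false_eq_true]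
      have h1 : total + triB run + 1 = (total + triB run) + triB 1 := by
        have : triB 1 = 1 := by decide
        rw [this]
      rw [h1, ih]

-- the loop of A's port equals aRec over the remaining suffix
lemma foldA (l : List Char) : ∀ (n k : Nat) (subs : List Int) (total : Int),
    l.length - k = n → subs.length = l.length → 1 ≤ k → k ≤ l.length →
    ((PySem.List.pyRange (k : Int) (l.length : Int) 1).foldl
      (fun (st : List Int × Int) i =>
        let v : Int := if PySem.List.pyGetD l (i - 1) ' ' == PySem.List.pyGetD l i ' '
                       then PySem.List.pyGetD st.1 (i - 1) 0 + 1 else 1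
        (st.1.set i.toNat v, st.2 + v))
      (subs, total)).2
    = aRec (l.drop k) (l.getD (k - 1) ' ') (subs.getD (k - 1) 0) total := by
  intro n
  induction n with
  | zero =>
    intro k subs total hn hlen hk1 hkl
    have hk : k = l.length := by omega
    subst hk
    rw [PySem.List.pyRange_one_eq_nil (le_refl _)]
    simp [aRec, List.drop_of_length_le (le_refl l.length)]
  | succ n ih =>
    intro k subs total hn hlen hk1 hkl
    have hklt : k < l.length := by omega
    rw [PySem.List.pyRange_one_cons (by exact_mod_cast hklt)]
    simp only [List.foldl_cons]
    have hcast : ((k : Int) - 1) = ((k - 1 : Nat) : Int) := by omega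
    have hgl1 : PySem.List.pyGetD l ((k : Int) - 1) ' ' = l.getD (k - 1) ' ' := by
      rw [hcast, PySem.List.pyGetD_natCast]
    have hgl : PySem.List.pyGetD l (k : Int) ' ' = l.getD k ' ' := by
      rw [PySem.List.pyGetD_natCast]
    have hgs : PySem.List.pyGetD subs ((k : Int) - 1) 0 = subs.getD (k - 1) 0 := by
      rw [hcast, PySem.List.pyGetD_natCast]
    simp only [hgl1, hgl, hgs]
    have hplus : ((k : Int) + 1) = ((k + 1 : Nat) : Int) := by omega
    rw [hplus, ih (k + 1) _ _ (by omega) (by simpa using hlen) (by omega) (by omega)]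
    have hset : ((subs.set (k : Int).toNat
        (if l.getD (k - 1) ' ' == l.getD k ' ' then subs.getD (k - 1) 0 + 1 else 1)).getD
        ((k + 1) - 1) 0)
        = (if l.getD (k - 1) ' ' == l.getD k ' ' then subs.getD (k - 1) 0 + 1 else 1) := by
      have hksub : (k : Int).toNat = k := by omega
      rw [hksub]
      simp only [Nat.add_sub_cancel]
      rw [List.getD_eq_getElem?_getD, List.getElem?_set_self (by omega), Option.getD_some]
    rw [hset]
    rw [List.drop_eq_getElem_cons hklt]
    simp only [aRec]
    have hgetk : l[k] = l.getD k ' ' := by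
      rw [List.getD_eq_getElem?_getD, List.getElem?_eq_getElem hklt, Option.getD_some]
    have hgetk1 : (l.getD ((k + 1) - 1) ' ') = l.getD k ' ' := by
      simp
    rw [hgetk, hgetk1]

-- ===== VERDICT (by name: the statement is the Claim_ definition above) =====
theorem countLetters_dp_spec : Claim_equal_countLetters_dp := by
  intro S _ hpre
  unfold Pre_countLetters_dp at hpre
  unfold Spec_countLetters_dp
  cases hl : S.toList with
  | nil => exact absurd hl hpre
  | cons c rest =>
    have hA : countLetters_dp S = aRec rest c 1 1 := by
      unfold countLetters_dp
      simp only [hl]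
      have hfold := foldA (c :: rest) ((c :: rest).length - 1) 1
        ((List.replicate (c :: rest).length 0).set 0 1) 1 rfl (by simp) (by omega) (by simp)
      simp only [Nat.cast_one] at hfold ⊢
      rw [hfold]
      simp [List.getD_eq_getElem?_getD]
    have hB : countLetters_dp_alt S = bLoop rest c 1 0 := by
      unfold countLetters_dp_alt
      simp only [hl]
    rw [hA, hB, ← aRec_eq_bLoop]
    norm_num
    rfl
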